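-- pv_equiv track=rewrite | github.com/kolyasalubov/UA-4592.PythonFundamentals | hw/hw08/AndriiBilan/8.2_Practical task.py | lower_fail_check
-- ===== SOURCE A (Python) =====
-- import string
--
-- def lower_fail_check(password:str):
--     """
--     Function checks if password has lower case letters
--     """
--     password_split = list(password)
--     fail_check = True
--     for char in password_split:
--         if char in string.ascii_lowercase:
--             fail_check = False
--             break
--     return fail_check
-- ===== SOURCE B (Python) =====
-- import string
--
-- def lower_fail_check(password: str):
--     """True iff password contains no ASCII lowercase letter.
--     Counts occurrences of each alphabet letter in the password and
--     checks that the total is zero."""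
--     return sum(list(password).count(c) for c in string.ascii_lowercase) == 0
-- ===== Notes on version B (the rewrite author's own statement) =====
-- stated objective: alternative
-- what changed: Inverted the traversal: instead of scanning the password once with a break-and-flag, B loops over the 26 alphabet letters, counts each letter's occurrences in the password, and returns whether the total count is zero.
import Mathlib
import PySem

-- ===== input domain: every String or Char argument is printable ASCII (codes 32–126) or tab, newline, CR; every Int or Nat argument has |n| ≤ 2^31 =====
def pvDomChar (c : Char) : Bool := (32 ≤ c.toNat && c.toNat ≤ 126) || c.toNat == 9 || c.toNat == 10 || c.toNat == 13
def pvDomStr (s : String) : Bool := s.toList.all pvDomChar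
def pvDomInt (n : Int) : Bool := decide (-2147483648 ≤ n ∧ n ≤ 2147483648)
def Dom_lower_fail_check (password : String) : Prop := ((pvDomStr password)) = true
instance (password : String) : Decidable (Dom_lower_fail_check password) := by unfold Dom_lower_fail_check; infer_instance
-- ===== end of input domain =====

-- B inverts A's traversal: instead of scanning the password with a break-and-flag,
-- it sums, over the 26 alphabet letters, each letter's occurrence count in the
-- password, and returns whether the total is zero (objective: alternative).

-- string.ascii_lowercase
def pvAsciiLowercase : List Char := "abcdefghijklmnopqrstuvwxyz".toList

-- ===== PORT A =====
-- the for-loop with 'break' and the fail_check flag, as structural recursion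
def pvALoop : List Char → Bool
  | [] => true
  | c :: rest => if pvAsciiLowercase.contains c then false else pvALoop rest

def lower_fail_check (password : String) : Bool := pvALoop password.toList

-- ===== PORT B =====
-- sum(list(password).count(c) for c in string.ascii_lowercase) == 0
def lower_fail_check_alt (password : String) : Bool :=
  decide ((pvAsciiLowercase.foldl
            (fun acc c => acc + ((PySem.List.count password.toList c : Nat) : Int)) 0) = 0)

-- ===== PRECONDITION & SPEC =====
def Spec_lower_fail_check (password : String) (out : Bool) : Prop := out = lower_fail_check_alt password
instance (password : String) (out : Bool) : Decidable (Spec_lower_fail_check password out) := by unfold Spec_lower_fail_check; infer_instance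

-- ===== CLAIM (what is proved, stated in full; the proofs are below) =====
def Claim_equal_lower_fail_check : Prop := ∀ (password : String), Dom_lower_fail_check password → Spec_lower_fail_check password (lower_fail_check password)

-- ===== LEMMAS AND PROOFS =====
theorem pvALoop_eq_true_iff (xs : List Char) :
    pvALoop xs = true ↔ ∀ c ∈ pvAsciiLowercase, xs.count c = 0 := by
  induction xs with
  | nil => simp [pvALoop]
  | cons c rest ih =>
    simp only [pvALoop]
    by_cases h : pvAsciiLowercase.contains c
    · have hc : c ∈ pvAsciiLowercase := List.contains_iff_mem.mp h
      rw [if_pos h]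
      refine iff_of_false (by simp) ?_
      intro hall
      have := hall c hc
      simp [List.count_cons_self] at this
    · have hc : c ∉ pvAsciiLowercase := List.contains_iff_mem.not.mp h
      simp only [if_neg h, ih]
      constructor
      · intro hall d hd
        have hne : (d == c) = false := by
          simp only [beq_eq_false_iff_ne]; rintro rfl; exact hc hd
        have hne' : ¬ c = d := fun e => (beq_eq_false_iff_ne.mp hne) e.symm
        simp [hne', hall d hd]
      · intro hall d hd
        have := hall d hd
        rw [List.count_cons] at this
        omega

theorem pvFoldl_count_zero_iff (xs ls : List Char) (n : Int) (hn : 0 ≤ n) :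
    (ls.foldl (fun acc c => acc + ((PySem.List.count xs c : Nat) : Int)) n = 0) ↔
      (n = 0 ∧ ∀ c ∈ ls, xs.count c = 0) := by
  induction ls generalizing n with
  | nil => simp
  | cons c rest ih =>
    simp only [List.foldl_cons]
    have hcount : (0:Int) ≤ ((PySem.List.count xs c : Nat) : Int) := Int.natCast_nonneg _
    rw [ih _ (by omega)]
    constructor
    · rintro ⟨h0, hall⟩
      have hc0 : ((PySem.List.count xs c : Nat) : Int) = 0 := by omega
      have : xs.count c = 0 := by
        have := Int.natCast_eq_zero.mp hc0
        simpa [PySem.List.count] using this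
      refine ⟨by omega, ?_⟩
      intro d hd
      rcases List.mem_cons.mp hd with rfl | hd'
      · exact this
      · exact hall d hd'
    · rintro ⟨h0, hall⟩
      have hc0 : ((PySem.List.count xs c : Nat) : Int) = 0 := by
        simp [PySem.List.count, hall c (by simp)]
      exact ⟨by omega, fun d hd => hall d (by simp [hd])⟩

-- ===== VERDICT (by name: the statement is the Claim_ definition above) =====
theorem lower_fail_check_spec : Claim_equal_lower_fail_check := by
  intro password _
  unfold Spec_lower_fail_check lower_fail_check lower_fail_check_alt
  cases ha : pvALoop password.toList with
  | false =>
    have h := (not_iff_not.mpr (pvALoop_eq_true_iff password.toList)).mp (by simp [ha])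
    symm
    rw [decide_eq_false_iff_not, pvFoldl_count_zero_iff password.toList pvAsciiLowercase 0 le_rfl]
    rintro ⟨-, hall⟩
    exact h hall
  | true =>
    have h := (pvALoop_eq_true_iff password.toList).mp ha
    symm
    rw [decide_eq_true_eq, pvFoldl_count_zero_iff password.toList pvAsciiLowercase 0 le_rfl]
    exact ⟨rfl, h⟩
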